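-- pv_equiv track=rewrite | github.com/NicoKNL/coding-problems | problems/advent-of-code/2023/21/sol1.py | step
-- ===== SOURCE A (Python) =====
-- Pos = tuple[int, int]
--
-- def getNeighbors(pos: Pos) -> list[Pos]:
--     neighbors = []
--
--     offsets = [(0, 1), (0, -1), (1, 0), (-1, 0)]
--     for offset in offsets:
--         neighbors.append((pos[0] + offset[0], pos[1] + offset[1]))
--
--     return neighbors
--
-- def step(grid: dict[Pos, str]) -> dict[Pos, str]:
--     reachable_positions = set()
--
--     for pos, plot in grid.items():
--         if plot != "O":
--             continue
--
--         grid[pos] = "."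
--         for next_pos in getNeighbors(pos):
--             if next_pos in grid and grid[next_pos] != "#":
--                 reachable_positions.add(next_pos)
--
--     for pos in reachable_positions:
--         grid[pos] = "O"
--
--     return grid
-- ===== SOURCE B (Python) =====
-- def step(grid):
--     orig_O = {pos for pos, plot in grid.items() if plot == "O"}
--     for (x, y), plot in grid.items():
--         if plot != "#" and any(
--             n in orig_O for n in ((x + 1, y), (x - 1, y), (x, y + 1), (x, y - 1))
--         ):
--             grid[(x, y)] = "O"
--         elif (x, y) in orig_O:
--             grid[(x, y)] = "."
--     return grid
-- ===== Notes on version B (the rewrite author's own statement) =====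
-- stated objective: alternative
-- what changed: B replaces A's push-style two-phase update (turn each O cell to '.' while accumulating a reachable-positions set from its neighbors, then overwrite that set with 'O') by a single pull-style pass: each cell is decided directly from a snapshot of the originally-O positions — a non-'#' cell with an originally-O neighbor becomes 'O', an originally-O cell without one becomes '.'.
import Mathlib
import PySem

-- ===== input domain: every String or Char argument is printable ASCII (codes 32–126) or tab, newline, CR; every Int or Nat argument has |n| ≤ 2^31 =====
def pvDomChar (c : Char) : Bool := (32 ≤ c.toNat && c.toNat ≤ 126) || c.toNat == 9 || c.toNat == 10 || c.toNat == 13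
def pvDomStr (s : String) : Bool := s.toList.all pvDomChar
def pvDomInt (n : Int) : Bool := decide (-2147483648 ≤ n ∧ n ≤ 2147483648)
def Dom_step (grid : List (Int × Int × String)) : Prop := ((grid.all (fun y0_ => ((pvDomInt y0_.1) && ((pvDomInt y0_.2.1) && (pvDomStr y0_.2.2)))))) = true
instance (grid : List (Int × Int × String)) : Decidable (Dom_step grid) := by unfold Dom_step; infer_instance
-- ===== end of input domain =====

-- B replaces A's push-style two-phase update (collect the reachable set from each "O" cell, then
-- overwrite) by a single pull-style pass deciding each cell from a snapshot of the original "O"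
-- cells (objective: alternative). Both Pythons mutate `grid` in place identically; the equivalence
-- proved here is about the returned value.

-- ===== PORT A =====
def getNeighbors (pos : Int × Int) : List (Int × Int) :=
  [((0 : Int), (1 : Int)), (0, -1), (1, 0), (-1, 0)].foldl
    (fun neighbors offset => neighbors ++ [(pos.1 + offset.1, pos.2 + offset.2)]) []

-- body of A's `for pos, plot in grid.items():` loop (state = live dict × reachable set)
def stepBody (st : PySem.Dict (Int × Int) String × PySem.Set (Int × Int))
    (pp : (Int × Int) × String) : PySem.Dict (Int × Int) String × PySem.Set (Int × Int) :=
  if pp.2 ≠ "O" then st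
  else
    let g := st.1.insert pp.1 "."
    (g, (getNeighbors pp.1).foldl
      (fun r np =>
        match g.get? np with
        | some v => if v ≠ "#" then PySem.Set.add r np else r
        | none => r) st.2)

def step (grid : List (Int × Int × String)) : List (Int × Int × String) :=
  -- the dict argument arrives as its items list; rebuild the dict exactly as Python's dict does
  let g0 : PySem.Dict (Int × Int) String :=
    PySem.Dict.ofList (grid.map (fun e => ((e.1, e.2.1), e.2.2)))
  let st := g0.items.foldl stepBody (g0, PySem.Set.ofList [])
  -- `for pos in reachable_positions: grid[pos] = "O"` (result independent of the set's order:
  -- every write stores "O" at an existing key, proved by the final equality)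
  let gfin := st.2.foldl (fun g pos => g.insert pos "O") st.1
  gfin.items.map (fun p => (p.1.1, p.1.2, p.2))

-- ===== PORT B =====
-- body of B's single `for (x, y), plot in grid.items():` loop
def altBody (origO : PySem.Set (Int × Int)) (g : PySem.Dict (Int × Int) String)
    (pp : (Int × Int) × String) : PySem.Dict (Int × Int) String :=
  if !(pp.2 == "#") &&
      ([(pp.1.1 + 1, pp.1.2), (pp.1.1 - 1, pp.1.2), (pp.1.1, pp.1.2 + 1), (pp.1.1, pp.1.2 - 1)]
        : List (Int × Int)).any (fun n => PySem.Set.contains origO n) then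
    g.insert pp.1 "O"
  else if PySem.Set.contains origO pp.1 then g.insert pp.1 "."
  else g

def step_alt (grid : List (Int × Int × String)) : List (Int × Int × String) :=
  let g0 : PySem.Dict (Int × Int) String :=
    PySem.Dict.ofList (grid.map (fun e => ((e.1, e.2.1), e.2.2)))
  let origO : PySem.Set (Int × Int) :=
    PySem.Set.ofList ((g0.items.filter (fun p => p.2 == "O")).map (fun p => p.1))
  ((g0.items.foldl (altBody origO) g0).items).map (fun p => (p.1.1, p.1.2, p.2))

-- ===== PRECONDITION & SPEC =====
def Spec_step (grid : List (Int × Int × String)) (out : List (Int × Int × String)) : Prop := out = step_alt grid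
instance (grid : List (Int × Int × String)) (out : List (Int × Int × String)) : Decidable (Spec_step grid out) := by unfold Spec_step; infer_instance

-- ===== CLAIM (what is proved, stated in full; the proofs are below) =====
def Claim_equal_step : Prop := ∀ (grid : List (Int × Int × String)), Dom_step grid → Spec_step grid (step grid)

-- ===== LEMMAS AND PROOFS =====

-- neighbourhood is symmetric: b is a neighbour of a iff a is in B's neighbour list of b
lemma nbr_symm (a b : Int × Int) :
    b ∈ getNeighbors a ↔
      a ∈ ([(b.1 + 1, b.2), (b.1 - 1, b.2), (b.1, b.2 + 1), (b.1, b.2 - 1)] : List (Int × Int)) := by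
  simp [getNeighbors, List.foldl, Prod.ext_iff]
  omega

-- the dict component of A's first loop ignores the reachable set
lemma fold1_fst (l : List ((Int × Int) × String)) (g : PySem.Dict (Int × Int) String)
    (r : PySem.Set (Int × Int)) :
    (l.foldl stepBody (g, r)).1 =
      l.foldl (fun g pp => if pp.2 ≠ "O" then g else g.insert pp.1 ".") g := by
  induction l generalizing g r with
  | nil => rfl
  | cons pp t ih =>
    simp only [List.foldl_cons, stepBody]
    by_cases h : pp.2 = "O"
    · rw [if_neg (not_not_intro h), if_neg (not_not_intro h)]
      exact ih _ _
    · rw [if_pos h, if_pos h]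
      exact ih _ _

lemma dotFold_untouched (l : List ((Int × Int) × String)) (g : PySem.Dict (Int × Int) String)
    (k : Int × Int) (h : k ∉ l.map (·.1)) :
    (l.foldl (fun g pp => if pp.2 ≠ "O" then g else g.insert pp.1 ".") g).get? k = g.get? k := by
  induction l generalizing g with
  | nil => rfl
  | cons pp t ih =>
    simp only [List.map_cons, List.mem_cons, not_or] at h
    by_cases hv : pp.2 = "O"
    · simp only [List.foldl_cons, hv]
      simp only [ne_eq, not_true_eq_false, if_false]
      rw [ih _ h.2, PySem.Dict.get?_insert_of_ne _ _ h.1]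
    · simp only [List.foldl_cons, if_pos hv]
      exact ih _ h.2

lemma dotFold_get? (l : List ((Int × Int) × String)) (g : PySem.Dict (Int × Int) String)
    (k : Int × Int) (hnd : (l.map (·.1)).Nodup) :
    (l.foldl (fun g pp => if pp.2 ≠ "O" then g else g.insert pp.1 ".") g).get? k =
      if (k, "O") ∈ l then some "." else g.get? k := by
  induction l generalizing g with
  | nil => simp
  | cons pp t ih =>
    simp only [List.map_cons, List.nodup_cons] at hnd
    simp only [List.foldl_cons]
    by_cases hv : pp.2 = "O"
    · by_cases hk : k = pp.1
      · subst hk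
        rw [if_neg (not_not_intro hv), dotFold_untouched _ _ _ hnd.1,
          PySem.Dict.get?_insert_self]
        have hin : (pp.1, "O") ∈ pp :: t := by
          have : pp = (pp.1, "O") := by rw [Prod.ext_iff]; exact ⟨rfl, hv⟩
          exact this ▸ List.mem_cons_self ..
        rw [if_pos hin]
      · rw [if_neg (not_not_intro hv), ih _ hnd.2, PySem.Dict.get?_insert_of_ne _ _ hk]
        by_cases hm : (k, "O") ∈ t
        · rw [if_pos hm, if_pos (List.mem_cons_of_mem _ hm)]
        · rw [if_neg hm, if_neg]
          intro hc
          rcases List.mem_cons.1 hc with h1 | h1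
          · exact hk (congrArg Prod.fst h1)
          · exact hm h1
    · rw [if_pos hv, ih _ hnd.2]
      by_cases hm : (k, "O") ∈ t
      · rw [if_pos hm, if_pos (List.mem_cons_of_mem _ hm)]
      · rw [if_neg hm, if_neg]
        intro hc
        rcases List.mem_cons.1 hc with h1 | h1
        · exact hv (congrArg Prod.snd h1.symm)
        · exact hm h1

-- membership in the inner neighbour-collecting fold
lemma getD_hash (g : PySem.Dict (Int × Int) String) (n : Int × Int) :
    ((g.get? n).getD "#" ≠ "#") ↔ (∃ v, g.get? n = some v ∧ v ≠ "#") := by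
  cases hg : g.get? n <;> simp

-- membership in the inner neighbour-collecting fold
lemma innerFold_mem (g : PySem.Dict (Int × Int) String) (ns : List (Int × Int))
    (r : PySem.Set (Int × Int)) (np : Int × Int) :
    (np ∈ ns.foldl
        (fun r np =>
          match g.get? np with
          | some v => if v ≠ "#" then PySem.Set.add r np else r
          | none => r) r) ↔
      np ∈ r ∨ (np ∈ ns ∧ ∃ v, g.get? np = some v ∧ v ≠ "#") := by
  have hstep : ∀ (r : PySem.Set (Int × Int)) (n : Int × Int),
      (match g.get? n with
        | some v => if v ≠ "#" then PySem.Set.add r n else r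
        | none => r) = if (g.get? n).getD "#" ≠ "#" then PySem.Set.add r n else r := by
    intro r n
    cases hg : g.get? n <;> simp
  simp only [hstep]
  induction ns generalizing r with
  | nil => simp
  | cons n t ih =>
    simp only [List.foldl_cons]
    refine (ih (if (g.get? n).getD "#" ≠ "#" then PySem.Set.add r n else r)).trans ?_
    by_cases hc : (g.get? n).getD "#" ≠ "#"
    · simp only [if_pos hc, PySem.Set.mem_add, List.mem_cons]
      constructor
      · rintro ((h | h) | ⟨h1, h2⟩)
        · exact Or.inl h
        · exact Or.inr ⟨Or.inl h, (getD_hash g np).1 (by rw [h]; exact hc)⟩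
        · exact Or.inr ⟨Or.inr h1, h2⟩
      · rintro (h | ⟨h1 | h1, hv⟩)
        · exact Or.inl (Or.inl h)
        · exact Or.inl (Or.inr h1)
        · exact Or.inr ⟨h1, hv⟩
    · simp only [if_neg hc, List.mem_cons]
      constructor
      · rintro (h | ⟨h1, h2⟩)
        · exact Or.inl h
        · exact Or.inr ⟨Or.inr h1, h2⟩
      · rintro (h | ⟨h1 | h1, hv⟩)
        · exact Or.inl h
        · exact absurd ((getD_hash g n).2 (h1 ▸ hv)) hc
        · exact Or.inr ⟨h1, hv⟩

-- invariant: during A's first loop the live dict differs from g0 only by "O" ↦ "."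
def DotInv (g0 g : PySem.Dict (Int × Int) String) : Prop :=
  ∀ k, g.get? k = g0.get? k ∨ (g.get? k = some "." ∧ g0.get? k = some "O")

lemma DotInv_cond {g0 g : PySem.Dict (Int × Int) String} (h : DotInv g0 g) (np : Int × Int) :
    (∃ v, g.get? np = some v ∧ v ≠ "#") ↔ (∃ v, g0.get? np = some v ∧ v ≠ "#") := by
  rcases h np with h1 | ⟨h1, h2⟩
  · rw [h1]
  · rw [h1, h2]
    constructor
    · rintro ⟨v, _, _⟩
      exact ⟨"O", rfl, by decide⟩
    · rintro ⟨v, _, _⟩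
      exact ⟨".", rfl, by decide⟩

lemma reach_mem (g0 : PySem.Dict (Int × Int) String) (hnd : g0.keys.Nodup) (np : Int × Int) :
    ∀ (l : List ((Int × Int) × String)) (g : PySem.Dict (Int × Int) String)
      (r : PySem.Set (Int × Int)), (∀ pp ∈ l, pp ∈ g0.items) → DotInv g0 g →
      ((np ∈ (l.foldl stepBody (g, r)).2) ↔
        np ∈ r ∨ ∃ pp ∈ l, pp.2 = "O" ∧ np ∈ getNeighbors pp.1 ∧
          ∃ v, g0.get? np = some v ∧ v ≠ "#") := by
  intro l
  induction l with
  | nil => intro g r _ _; simp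
  | cons pp t ih =>
    intro g r hmem hInv
    by_cases hv : pp.2 = "O"
    · have hppm : pp ∈ g0.items := hmem pp (List.mem_cons_self ..)
      have hppO : g0.get? pp.1 = some "O" := by
        have hpe : pp = (pp.1, "O") := by rw [Prod.ext_iff]; exact ⟨rfl, hv⟩
        exact PySem.Dict.get?_of_mem_items _ (hpe ▸ hppm) hnd
      simp only [List.foldl_cons, stepBody]
      rw [if_neg (not_not_intro hv)]
      have hInv' : DotInv g0 (g.insert pp.1 ".") := by
        intro k
        by_cases hk : k = pp.1
        · subst hk
          exact Or.inr ⟨PySem.Dict.get?_insert_self .., hppO⟩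
        · rw [PySem.Dict.get?_insert_of_ne _ _ hk]
          exact hInv k
      refine (ih _ _ (fun q hq => hmem q (List.mem_cons_of_mem _ hq)) hInv').trans ?_
      rw [innerFold_mem]
      constructor
      · rintro ((h | ⟨h1, h2⟩) | ⟨q, hq, hqO, hqn, hval⟩)
        · exact Or.inl h
        · exact Or.inr ⟨pp, List.mem_cons_self .., hv, h1, (DotInv_cond hInv' np).1 h2⟩
        · exact Or.inr ⟨q, List.mem_cons_of_mem _ hq, hqO, hqn, hval⟩
      · rintro (h | ⟨q, hq, hqO, hqn, hval⟩)
        · exact Or.inl (Or.inl h)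
        · rcases List.mem_cons.1 hq with h1 | h1
          · exact Or.inl (Or.inr ⟨h1 ▸ hqn, (DotInv_cond hInv' np).2 hval⟩)
          · exact Or.inr ⟨q, h1, hqO, hqn, hval⟩
    · simp only [List.foldl_cons, stepBody]
      rw [if_pos hv]
      refine (ih _ _ (fun q hq => hmem q (List.mem_cons_of_mem _ hq)) hInv).trans ?_
      constructor
      · rintro (h | ⟨q, hq, hqO, hqn, hval⟩)
        · exact Or.inl h
        · exact Or.inr ⟨q, List.mem_cons_of_mem _ hq, hqO, hqn, hval⟩
      · rintro (h | ⟨q, hq, hqO, hqn, hval⟩)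
        · exact Or.inl h
        · rcases List.mem_cons.1 hq with h1 | h1
          · exact absurd (h1 ▸ hqO) hv
          · exact Or.inr ⟨q, h1, hqO, hqn, hval⟩

lemma phase2_get? (l : List (Int × Int)) (g : PySem.Dict (Int × Int) String) (k : Int × Int) :
    (l.foldl (fun g pos => g.insert pos "O") g).get? k =
      if k ∈ l then some "O" else g.get? k := by
  induction l generalizing g with
  | nil => simp
  | cons p t ih =>
    simp only [List.foldl_cons]
    rw [ih]
    by_cases ht : k ∈ t
    · rw [if_pos ht, if_pos (List.mem_cons_of_mem _ ht)]
    · rw [if_neg ht]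
      by_cases hp : k = p
      · rw [hp, PySem.Dict.get?_insert_self, if_pos (List.mem_cons_self ..)]
      · rw [PySem.Dict.get?_insert_of_ne _ _ hp, if_neg]
        intro hc
        rcases List.mem_cons.1 hc with h1 | h1
        · exact hp h1
        · exact ht h1

lemma keys_dotFold (l : List ((Int × Int) × String)) (g : PySem.Dict (Int × Int) String)
    (h : ∀ pp ∈ l, pp.1 ∈ g.keys) :
    (l.foldl (fun g pp => if pp.2 ≠ "O" then g else g.insert pp.1 ".") g).keys = g.keys := by
  induction l generalizing g with
  | nil => rfl
  | cons pp t ih =>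
    simp only [List.foldl_cons]
    by_cases hv : pp.2 = "O"
    · rw [if_neg (not_not_intro hv)]
      have hc : g.contains pp.1 = true :=
        (PySem.Dict.contains_iff_mem_keys ..).2 (h pp (List.mem_cons_self ..))
      have hkeys : (g.insert pp.1 ".").keys = g.keys :=
        PySem.Dict.keys_insert_of_contains _ _ hc
      rw [ih _ (fun q hq => hkeys ▸ h q (List.mem_cons_of_mem _ hq)), hkeys]
    · rw [if_pos hv]
      exact ih _ (fun q hq => h q (List.mem_cons_of_mem _ hq))

lemma keys_phase2 (l : List (Int × Int)) (g : PySem.Dict (Int × Int) String)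
    (h : ∀ p ∈ l, p ∈ g.keys) :
    (l.foldl (fun g pos => g.insert pos "O") g).keys = g.keys := by
  induction l generalizing g with
  | nil => rfl
  | cons p t ih =>
    simp only [List.foldl_cons]
    have hc : g.contains p = true :=
      (PySem.Dict.contains_iff_mem_keys ..).2 (h p (List.mem_cons_self ..))
    have hkeys : (g.insert p "O").keys = g.keys :=
      PySem.Dict.keys_insert_of_contains _ _ hc
    rw [ih _ (fun q hq => hkeys ▸ h q (List.mem_cons_of_mem _ hq)), hkeys]

lemma keys_altFold (origO : PySem.Set (Int × Int)) (l : List ((Int × Int) × String))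
    (g : PySem.Dict (Int × Int) String) (h : ∀ pp ∈ l, pp.1 ∈ g.keys) :
    (l.foldl (altBody origO) g).keys = g.keys := by
  have hstep : ∀ (g : PySem.Dict (Int × Int) String) (pp : (Int × Int) × String),
      pp.1 ∈ g.keys → (altBody origO g pp).keys = g.keys := by
    intro g pp hp
    have hc : g.contains pp.1 = true := (PySem.Dict.contains_iff_mem_keys ..).2 hp
    unfold altBody
    split_ifs <;> first | exact PySem.Dict.keys_insert_of_contains _ _ hc | rfl
  induction l generalizing g with
  | nil => rfl
  | cons pp t ih =>
    simp only [List.foldl_cons]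
    have hkeys : (altBody origO g pp).keys = g.keys :=
      hstep g pp (h pp (List.mem_cons_self ..))
    rw [ih _ (fun q hq => hkeys ▸ h q (List.mem_cons_of_mem _ hq)), hkeys]

lemma altBody_get?_ne (origO : PySem.Set (Int × Int)) (g : PySem.Dict (Int × Int) String)
    (pp : (Int × Int) × String) (k : Int × Int) (hk : k ≠ pp.1) :
    (altBody origO g pp).get? k = g.get? k := by
  unfold altBody
  split_ifs <;> first | exact PySem.Dict.get?_insert_of_ne _ _ hk | rfl

lemma altFold_untouched (origO : PySem.Set (Int × Int)) (l : List ((Int × Int) × String))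
    (g : PySem.Dict (Int × Int) String) (k : Int × Int) (h : k ∉ l.map (·.1)) :
    (l.foldl (altBody origO) g).get? k = g.get? k := by
  induction l generalizing g with
  | nil => rfl
  | cons pp t ih =>
    simp only [List.map_cons, List.mem_cons, not_or] at h
    simp only [List.foldl_cons]
    rw [ih _ h.2, altBody_get?_ne _ _ _ _ h.1]

lemma altFold_get? (origO : PySem.Set (Int × Int)) (l : List ((Int × Int) × String))
    (g : PySem.Dict (Int × Int) String) (k : Int × Int) (v : String)
    (hm : (k, v) ∈ l) (hnd : (l.map (·.1)).Nodup) :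
    (l.foldl (altBody origO) g).get? k =
      if !(v == "#") &&
          ([(k.1 + 1, k.2), (k.1 - 1, k.2), (k.1, k.2 + 1), (k.1, k.2 - 1)]
            : List (Int × Int)).any (fun n => PySem.Set.contains origO n) then some "O"
      else if PySem.Set.contains origO k then some "." else g.get? k := by
  induction l generalizing g with
  | nil => simp at hm
  | cons pp t ih =>
    simp only [List.map_cons, List.nodup_cons] at hnd
    rcases List.mem_cons.1 hm with h1 | h1
    · cases h1.symm
      simp only [List.foldl_cons]
      rw [altFold_untouched _ _ _ _ hnd.1]
      simp only [altBody]
      split_ifs <;> simp [PySem.Dict.get?_insert_self]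
    · have hk : k ≠ pp.1 := by
        intro e
        exact hnd.1 (e ▸ List.mem_map_of_mem h1)
      simp only [List.foldl_cons]
      rw [ih _ h1 hnd.2, altBody_get?_ne _ _ _ _ hk]

-- the core equality, stated on an arbitrary dict with distinct keys
lemma core_eq (g0 : PySem.Dict (Int × Int) String) (hnd : g0.keys.Nodup) :
    (let st := g0.items.foldl stepBody (g0, PySem.Set.ofList [])
     (st.2.foldl (fun g pos => g.insert pos "O") st.1).items) =
    (let origO : PySem.Set (Int × Int) :=
       PySem.Set.ofList ((g0.items.filter (fun p => p.2 == "O")).map (fun p => p.1))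
     (g0.items.foldl (altBody origO) g0).items) := by
  dsimp only
  have hndl : (g0.items.map (fun p => p.1)).Nodup := by
    simpa [PySem.Dict.keys] using hnd
  have hmemk : ∀ (p : Int × Int) (v : String), g0.get? p = some v → p ∈ g0.keys :=
    fun p v hv => PySem.Dict.mem_keys_of_mem_items _ (PySem.Dict.mem_items_of_get?_eq_some _ hv)
  have hkeysitems : ∀ pp ∈ g0.items, pp.1 ∈ g0.keys :=
    fun pp hpp => PySem.Dict.mem_keys_of_mem_items _ hpp
  have hInv0 : DotInv g0 g0 := fun _ => Or.inl rfl
  have hRA : ∀ np : Int × Int,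
      ((np ∈ (g0.items.foldl stepBody (g0, PySem.Set.ofList [])).2) ↔
        ∃ pp ∈ g0.items, pp.2 = "O" ∧ np ∈ getNeighbors pp.1 ∧
          ∃ v, g0.get? np = some v ∧ v ≠ "#") := by
    intro np
    rw [reach_mem g0 hnd np g0.items g0 (PySem.Set.ofList []) (fun q hq => hq) hInv0]
    simp [PySem.Set.ofList]
  have hfst : (g0.items.foldl stepBody (g0, PySem.Set.ofList [])).1
      = g0.items.foldl (fun g pp => if pp.2 ≠ "O" then g else g.insert pp.1 ".") g0 :=
    fold1_fst _ _ _
  rw [hfst]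
  have hkeys1 : (g0.items.foldl
        (fun g pp => if pp.2 ≠ "O" then g else g.insert pp.1 ".") g0).keys = g0.keys :=
    keys_dotFold _ _ hkeysitems
  have hkeysA : ((g0.items.foldl stepBody (g0, PySem.Set.ofList [])).2.foldl
      (fun g pos => g.insert pos "O")
      (g0.items.foldl (fun g pp => if pp.2 ≠ "O" then g else g.insert pp.1 ".") g0)).keys
      = g0.keys := by
    rw [keys_phase2 _ _ (fun p hp => by
      rw [hkeys1]
      rcases (hRA p).1 hp with ⟨q, hq, hqO, hqn, v, hv, hvne⟩
      exact hmemk p v hv), hkeys1]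
  have hkeysB : ((g0.items.foldl
      (altBody (PySem.Set.ofList ((g0.items.filter (fun p => p.2 == "O")).map (fun p => p.1)))) g0)).keys
      = g0.keys :=
    keys_altFold _ _ _ hkeysitems
  have horig : ∀ n : Int × Int,
      PySem.Set.contains
        (PySem.Set.ofList ((g0.items.filter (fun p => p.2 == "O")).map (fun p => p.1))) n = true
        ↔ g0.get? n = some "O" := by
    intro n
    rw [PySem.Set.contains_iff]
    constructor
    · intro hn
      rcases List.mem_map.1 ((PySem.Set.mem_ofList ..).1 hn) with ⟨pp, hpf, hpe⟩
      rcases List.mem_filter.1 hpf with ⟨hpi, hpO⟩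
      have hppe : pp = (n, "O") := by
        rw [Prod.ext_iff]
        exact ⟨hpe, by simpa using hpO⟩
      exact PySem.Dict.get?_of_mem_items _ (hppe ▸ hpi) hnd
    · intro hn
      exact (PySem.Set.mem_ofList ..).2 (List.mem_map.2
        ⟨(n, "O"), List.mem_filter.2 ⟨PySem.Dict.mem_items_of_get?_eq_some _ hn, by simp⟩, rfl⟩)
  rw [PySem.Dict.items_eq_map_keys ((g0.items.foldl stepBody (g0, PySem.Set.ofList [])).2.foldl
      (fun g pos => g.insert pos "O")
      (g0.items.foldl (fun g pp => if pp.2 ≠ "O" then g else g.insert pp.1 ".") g0))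
      (by rw [hkeysA]; exact hnd) "",
    PySem.Dict.items_eq_map_keys (g0.items.foldl
      (altBody (PySem.Set.ofList ((g0.items.filter (fun p => p.2 == "O")).map (fun p => p.1)))) g0)
      (by rw [hkeysB]; exact hnd) "", hkeysA, hkeysB]
  refine List.map_congr_left ?_
  intro k hk
  obtain ⟨v, hv⟩ : ∃ v, g0.get? k = some v := by
    cases hg : g0.get? k with
    | none => exact absurd ((PySem.Dict.get?_eq_none_iff_not_mem_keys ..).1 hg) (not_not_intro hk)
    | some v => exact ⟨v, rfl⟩
  have hkv : (k, v) ∈ g0.items := PySem.Dict.mem_items_of_get?_eq_some _ hv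
  refine congrArg _ ?_
  rw [PySem.Dict.getD_eq_get?_getD, PySem.Dict.getD_eq_get?_getD,
    phase2_get?, dotFold_get? _ _ _ hndl, altFold_get? _ _ _ _ v hkv hndl]
  have hcond : ((k ∈ (g0.items.foldl stepBody (g0, PySem.Set.ofList [])).2) ↔
      (¬ v = "#" ∧ ∃ n ∈ ([(k.1 + 1, k.2), (k.1 - 1, k.2), (k.1, k.2 + 1), (k.1, k.2 - 1)]
        : List (Int × Int)), g0.get? n = some "O")) := by
    rw [hRA k]
    constructor
    · rintro ⟨pp, hpi, hpO, hkn, w, hw, hwne⟩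
      rw [hv] at hw
      injection hw with hw
      have hppe : pp = (pp.1, "O") := by rw [Prod.ext_iff]; exact ⟨rfl, hpO⟩
      exact ⟨hw ▸ hwne, pp.1, (nbr_symm pp.1 k).1 hkn,
        PySem.Dict.get?_of_mem_items _ (hppe ▸ hpi) hnd⟩
    · rintro ⟨hvne, n, hn, hnO⟩
      exact ⟨(n, "O"), PySem.Dict.mem_items_of_get?_eq_some _ hnO, rfl,
        (nbr_symm n k).2 hn, v, hv, hvne⟩
  have hOk : (((k, "O") ∈ g0.items) ↔ v = "O") := by
    constructor
    · intro hc
      have h2 := PySem.Dict.get?_of_mem_items _ hc hnd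
      rw [hv] at h2
      injection h2 with h2
    · intro e
      exact e ▸ hkv
  have hbB : (((!(v == "#") &&
      ([(k.1 + 1, k.2), (k.1 - 1, k.2), (k.1, k.2 + 1), (k.1, k.2 - 1)]
        : List (Int × Int)).any (fun n => PySem.Set.contains
          (PySem.Set.ofList ((g0.items.filter (fun p => p.2 == "O")).map (fun p => p.1))) n))
      = true)
      ↔ (¬ v = "#" ∧ ∃ n ∈ ([(k.1 + 1, k.2), (k.1 - 1, k.2), (k.1, k.2 + 1), (k.1, k.2 - 1)]
        : List (Int × Int)), g0.get? n = some "O")) := by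
    simp only [List.any_eq_true, Bool.and_eq_true, Bool.not_eq_true', beq_eq_false_iff_ne, ne_eq]
    constructor
    · rintro ⟨h1, n, hn1, hn2⟩
      exact ⟨h1, n, hn1, (horig n).1 hn2⟩
    · rintro ⟨h1, n, hn1, hn2⟩
      exact ⟨h1, n, hn1, (horig n).2 hn2⟩
  have hcB : ((PySem.Set.contains
      (PySem.Set.ofList ((g0.items.filter (fun p => p.2 == "O")).map (fun p => p.1))) k = true)
      ↔ v = "O") := by
    rw [horig k, hv]
    constructor
    · intro h2
      injection h2 with h2
    · intro e
      rw [e]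
  simp only [hcond, hbB, hcB, hOk]

-- ===== VERDICT (by name: the statement is the Claim_ definition above) =====
theorem step_spec : Claim_equal_step := by
  intro grid _
  show step grid = step_alt grid
  unfold step step_alt
  exact congrArg _ (core_eq _ (PySem.Dict.nodup_keys_ofList _))
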